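-- pv_equiv track=rewrite | github.com/shashank-kakarla/python-competitive-coding | Graph/shortest_path.py | search_dest_1
-- ===== SOURCE A (Python) =====
-- def search_dest_1(graph, src, dest, visited):
--     if src in visited:
--         return 0
--
--     visited.add(src)
--     size = 1
--     for i in graph[src]:
--         if i == dest:
--             return size
--         else:
--             size+=search_dest_1(graph,i,dest,visited)
--     return size
-- ===== SOURCE B (Python) =====
-- def search_dest_1(graph, src, dest, visited):
--     stack = [src]
--     count = 0
--     while stack:
--         u = stack.pop()
--         if u in visited:
--             continue
--         visited.add(u)
--         count += 1
--         prefix = []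
--         for i in graph[u]:
--             if i == dest:
--                 break
--             prefix.append(i)
--         stack.extend(reversed(prefix))
--     return count
-- ===== Notes on version B (the rewrite author's own statement) =====
-- stated objective: alternative
-- what changed: Replaces A's recursive DFS (with an early return at the first dest neighbour) by an iterative DFS with an explicit stack and a counter: pop a node, skip it if visited, otherwise count it and push the prefix of its adjacency list before the first dest occurrence in reverse, so pops follow A's preorder exactly.
import Mathlib
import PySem

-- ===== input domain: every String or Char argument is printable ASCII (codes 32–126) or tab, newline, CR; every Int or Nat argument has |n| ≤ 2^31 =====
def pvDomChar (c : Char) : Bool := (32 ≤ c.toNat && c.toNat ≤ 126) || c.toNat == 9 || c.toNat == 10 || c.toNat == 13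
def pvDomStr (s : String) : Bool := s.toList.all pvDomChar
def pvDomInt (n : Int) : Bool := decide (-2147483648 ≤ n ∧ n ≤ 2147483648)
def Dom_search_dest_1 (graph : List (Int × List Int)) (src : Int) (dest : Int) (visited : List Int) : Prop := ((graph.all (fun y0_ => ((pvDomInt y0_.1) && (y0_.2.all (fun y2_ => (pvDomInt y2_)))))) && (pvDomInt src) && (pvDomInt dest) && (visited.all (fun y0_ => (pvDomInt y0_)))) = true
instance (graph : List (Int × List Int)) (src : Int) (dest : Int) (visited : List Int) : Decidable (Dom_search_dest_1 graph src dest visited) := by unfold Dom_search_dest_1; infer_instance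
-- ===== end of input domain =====

-- B replaces A's recursion by an iterative DFS with an explicit stack and a counter (alternative
-- decomposition, same cost). Both A and B mutate `visited` in place identically; the equivalence
-- proved here is about the return value only.

-- ===== PORT A =====
-- the for-loop body of A: `for i in graph[src]: if i == dest: return size else: size += rec(...)`
-- (the early `return size` is the stop case of this structural recursion on the neighbour list)
def pvAgo (dest : Int) (rec : Int → PySem.Set Int → Int × PySem.Set Int) :
    List Int → Int → PySem.Set Int → Int × PySem.Set Int
  | [], size, vis => (size, vis)
  | i :: rest, size, vis =>
    if i = dest then (size, vis)
    else
      let p := rec i vis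
      pvAgo dest rec rest (size + p.1) p.2

-- A's recursive function; the Nat is a totality fuel (graph.length + 1 always suffices, because a
-- recursive call is only made after an unvisited graph key has been added to `visited`).
-- It returns (size, visited') to model Python's in-place mutation of `visited`.
def pvArec (graph : List (Int × List Int)) (dest : Int) :
    Nat → Int → PySem.Set Int → Int × PySem.Set Int
  | 0, _, vis => (0, vis)  -- fuel guard, unreachable at fuel graph.length + 1
  | n+1, src, vis =>
    if PySem.Set.contains vis src then (0, vis)
    else pvAgo dest (pvArec graph dest n)
      (PySem.Dict.getD (PySem.Dict.mk graph) src []) 1 (PySem.Set.add vis src)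

def search_dest_1 (graph : List (Int × List Int)) (src : Int) (dest : Int) (visited : List Int) : Int :=
  (pvArec graph dest (graph.length + 1) src (PySem.Set.ofList visited)).1

-- ===== PORT B =====
-- `prefix = []; for i in graph[u]: if i == dest: break; prefix.append(i)`
def pvPrefix (dest : Int) : List Int → List Int
  | [] => []
  | i :: rest => if i = dest then [] else i :: pvPrefix dest rest

-- B's while-loop over the explicit stack (head = top of stack; `stack.extend(reversed(prefix))`
-- makes the new stack `prefix ++ rest`).  The Nat is a totality fuel: each node is processed
-- unvisited at most once, so 1 + Σ (len(adj)+1) pops always suffice.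
def pvBloop (graph : List (Int × List Int)) (dest : Int) :
    Nat → List Int → Int → PySem.Set Int → Int
  | 0, _, count, _ => count  -- fuel guard, unreachable at the fuel below
  | n+1, stack, count, vis =>
    match stack with
    | [] => count
    | u :: rest =>
      if PySem.Set.contains vis u then pvBloop graph dest n rest count vis
      else
        pvBloop graph dest n
          (pvPrefix dest (PySem.Dict.getD (PySem.Dict.mk graph) u []) ++ rest)
          (count + 1) (PySem.Set.add vis u)

def search_dest_1_alt (graph : List (Int × List Int)) (src : Int) (dest : Int) (visited : List Int) : Int :=
  pvBloop graph dest ((graph.map (fun p => p.2.length + 1)).sum + 1) [src] 0 (PySem.Set.ofList visited)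

-- ===== PRECONDITION & SPEC =====
-- one saturation step of the reachability closure: every set member that is an unvisited graph key
-- contributes the prefix of its adjacency list before the first dest occurrence
def pvReachStep (graph : List (Int × List Int)) (dest : Int) (visited : List Int)
    (cur : List Int) : List Int :=
  graph.foldl
    (fun acc p =>
      if p.1 ∈ cur ∧ p.1 ∉ visited then
        (p.2.takeWhile (fun i => i ≠ dest)).foldl (fun a i => if i ∈ a then a else a ++ [i]) acc
      else acc) cur

-- nodes reachable from src along pre-dest edges through unvisited keys (graph.length + 1
-- saturation steps always reach the closure: any reaching path uses at most graph.length edges)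
def pvReach (graph : List (Int × List Int)) (dest : Int) (visited : List Int) (src : Int) :
    List Int :=
  (pvReachStep graph dest visited)^[graph.length + 1] [src]

-- Pre_ excludes exactly the inputs on which Python A raises KeyError: src unvisited and some node
-- reachable from src (along the pre-dest prefixes of adjacency lists, through unvisited keys) is
-- unvisited but not a key of graph — on every such input the DFS indexes graph[u] for a missing u.
-- Reachability is a graph-theoretic, order-independent closure, not a copy of either port's DFS.
def Pre_search_dest_1 (graph : List (Int × List Int)) (src : Int) (dest : Int) (visited : List Int) : Prop :=
  src ∈ visited ∨
    ∀ u ∈ pvReach graph dest visited src, u ∉ visited → (PySem.Dict.mk graph).contains u = true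
instance (graph : List (Int × List Int)) (src : Int) (dest : Int) (visited : List Int) : Decidable (Pre_search_dest_1 graph src dest visited) := by unfold Pre_search_dest_1; infer_instance

def pvWitness_search_dest_1 : (List (Int × List Int)) × Int × Int × List Int :=
  ([(0, [1]), (1, [0])], 0, 2, [])

def Spec_search_dest_1 (graph : List (Int × List Int)) (src : Int) (dest : Int) (visited : List Int) (out : Int) : Prop := out = search_dest_1_alt graph src dest visited
instance (graph : List (Int × List Int)) (src : Int) (dest : Int) (visited : List Int) (out : Int) : Decidable (Spec_search_dest_1 graph src dest visited out) := by unfold Spec_search_dest_1; infer_instance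

-- ===== CLAIM (what is proved, stated in full; the proofs are below) =====
def Claim_equal_search_dest_1 : Prop := ∀ (graph : List (Int × List Int)) (src : Int) (dest : Int) (visited : List Int), Dom_search_dest_1 graph src dest visited → Pre_search_dest_1 graph src dest visited → Spec_search_dest_1 graph src dest visited (search_dest_1 graph src dest visited)

-- ===== LEMMAS AND PROOFS =====

-- `v ⊆ w` on visited sets
def pvSub (v w : PySem.Set Int) : Prop := ∀ x : Int, x ∈ v → x ∈ w

theorem pvSub_refl (v : PySem.Set Int) : pvSub v v := fun _ h => h

theorem pvSub_trans {u v w : PySem.Set Int} (h1 : pvSub u v) (h2 : pvSub v w) : pvSub u w :=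
  fun x hx => h2 x (h1 x hx)

theorem pvSub_add (v : PySem.Set Int) (x : Int) : pvSub v (PySem.Set.add v x) :=
  fun y hy => (PySem.Set.mem_add v x y).2 (Or.inl hy)

-- the visited set only grows through A's loop body
theorem pvAgo_grow (dest : Int) (rec : Int → PySem.Set Int → Int × PySem.Set Int)
    (hrec : ∀ i vis, pvSub vis (rec i vis).2) :
    ∀ (adj : List Int) (size : Int) (vis : PySem.Set Int),
      pvSub vis (pvAgo dest rec adj size vis).2 := by
  intro adj
  induction adj with
  | nil => intro size vis; exact pvSub_refl vis
  | cons i rest ih =>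
    intro size vis
    by_cases hid : i = dest
    · simp only [pvAgo, if_pos hid]; exact pvSub_refl vis
    · simp only [pvAgo, if_neg hid]
      exact pvSub_trans (hrec i vis) (ih _ _)

-- the visited set only grows through A's recursion
theorem pvArec_grow (graph : List (Int × List Int)) (dest : Int) :
    ∀ (n : Nat) (src : Int) (vis : PySem.Set Int),
      pvSub vis (pvArec graph dest n src vis).2 := by
  intro n
  induction n with
  | zero => intro src vis; exact pvSub_refl vis
  | succ n ih =>
    intro src vis
    by_cases h : PySem.Set.contains vis src = true
    · simp only [pvArec, if_pos h]; exact pvSub_refl vis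
    · simp only [pvArec, if_neg h]
      exact pvSub_trans (pvSub_add vis src) (pvAgo_grow dest (pvArec graph dest n) ih _ _ _)

-- membership facts used throughout (Set.contains bridged to ∈)
theorem pv_contains_true {vis : PySem.Set Int} {u : Int} (h : u ∈ vis) :
    PySem.Set.contains vis u = true := List.contains_iff_mem.2 h

theorem pv_contains_false {vis : PySem.Set Int} {u : Int} (h : u ∉ vis) :
    ¬ (PySem.Set.contains vis u = true) := fun hc => h (List.contains_iff_mem.1 hc)

-- number of graph entries whose key is not yet visited (A's recursion-depth measure)
def pvMu (graph : List (Int × List Int)) (vis : PySem.Set Int) : Nat :=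
  (graph.filter (fun p => !(PySem.Set.contains vis p.1))).length

theorem pvMu_mono (graph : List (Int × List Int)) {v w : PySem.Set Int} (h : pvSub v w) :
    pvMu graph w ≤ pvMu graph v := by
  induction graph with
  | nil => simp [pvMu]
  | cons q t ih =>
    by_cases hw : q.1 ∈ w
    · by_cases hv : q.1 ∈ v <;> simp [pvMu, hw, hv] at ih ⊢ <;> omega
    · have hv : q.1 ∉ v := fun hv => hw (h q.1 hv)
      simp [pvMu, hw, hv] at ih ⊢; omega

theorem pvMu_le_length (graph : List (Int × List Int)) (vis : PySem.Set Int) :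
    pvMu graph vis ≤ graph.length := by
  simpa [pvMu] using List.length_filter_le _ graph

-- looking a key up in the raw association list
theorem pv_get?_mk_some {graph : List (Int × List Int)} {u : Int} {a : List Int}
    (h : (PySem.Dict.mk graph).get? u = some a) : ∃ p ∈ graph, p.1 = u := by
  induction graph with
  | nil => simp [PySem.Dict.get?] at h
  | cons q t ih =>
    rw [PySem.Dict.get?_mk_cons] at h
    by_cases hq : q.1 = u
    · exact ⟨q, by simp, hq⟩
    · rcases ih (by simpa [hq] using h) with ⟨p, hp, hpu⟩
      exact ⟨p, by simp [hp], hpu⟩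

theorem pv_get?_mk_none {graph : List (Int × List Int)} {u : Int}
    (h : (PySem.Dict.mk graph).get? u = none) : ∀ p ∈ graph, p.1 ≠ u := by
  induction graph with
  | nil => simp
  | cons q t ih =>
    rw [PySem.Dict.get?_mk_cons] at h
    by_cases hq : q.1 = u
    · simp [hq] at h
    · intro p hp
      rcases List.mem_cons.1 hp with hp | hp
      · exact hp ▸ hq
      · exact ih (by simpa [hq] using h) p hp

theorem pv_getD_first {graph : List (Int × List Int)} {u : Int} {adj : List Int}
    (h : (PySem.Dict.mk graph).get? u = some adj) :
    PySem.Dict.getD (PySem.Dict.mk graph) u [] = adj := by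
  show ((PySem.Dict.mk graph).get? u).getD [] = adj
  rw [h]; rfl

theorem pv_getD_none {graph : List (Int × List Int)} {u : Int}
    (h : (PySem.Dict.mk graph).get? u = none) :
    PySem.Dict.getD (PySem.Dict.mk graph) u [] = [] := by
  show ((PySem.Dict.mk graph).get? u).getD [] = []
  rw [h]; rfl

-- adding an unvisited key strictly decreases the measure
theorem pvMu_add_key {graph : List (Int × List Int)} {u : Int} (vis : PySem.Set Int)
    (hk : ∃ p ∈ graph, p.1 = u) (hu : u ∉ vis) :
    pvMu graph (PySem.Set.add vis u) + 1 ≤ pvMu graph vis := by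
  induction graph with
  | nil => simp at hk
  | cons q t ih =>
    rcases hk with ⟨p, hp, hpu⟩
    by_cases hq : q.1 = u
    · have hmt := pvMu_mono t (pvSub_add vis u)
      simp [pvMu, hq, hu] at hmt ⊢
      omega
    · rcases List.mem_cons.1 hp with hp | hp
      · exact absurd (hp ▸ hpu) hq
      · have ih' := ih ⟨p, hp, hpu⟩
        by_cases hc : q.1 ∈ vis <;> simp [pvMu, hq, hc] at ih' ⊢ <;> omega

-- fuel irrelevance for A's recursion: any fuel at least the measure gives the same result
theorem pvArec_mono (graph : List (Int × List Int)) (dest : Int) :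
    ∀ (k : Nat), ∀ (n m : Nat) (src : Int) (vis : PySem.Set Int),
      pvMu graph vis = k → pvMu graph vis ≤ n → pvMu graph vis ≤ m →
      pvArec graph dest (n+1) src vis = pvArec graph dest (m+1) src vis := by
  intro k
  induction k using Nat.strong_induction_on with
  | _ k ih =>
    intro n m src vis hk hn hm
    by_cases h : PySem.Set.contains vis src = true
    · simp only [pvArec, if_pos h]
    · simp only [pvArec, if_neg h]
      rcases hadj : (PySem.Dict.mk graph).get? src with _ | adj
      · rw [pv_getD_none hadj]; simp [pvAgo]
      · have hkey : ∃ p ∈ graph, p.1 = src := pv_get?_mk_some hadj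
        have hdec : pvMu graph (PySem.Set.add vis src) + 1 ≤ pvMu graph vis :=
          pvMu_add_key vis hkey (fun hm => h (pv_contains_true hm))
        obtain ⟨n', rfl⟩ : ∃ n', n = n' + 1 := ⟨n - 1, by omega⟩
        obtain ⟨m', rfl⟩ : ∃ m', m = m' + 1 := ⟨m - 1, by omega⟩
        have hcong : ∀ (adj' : List Int) (size : Int) (vis' : PySem.Set Int),
            pvSub (PySem.Set.add vis src) vis' →
            pvAgo dest (pvArec graph dest (n' + 1)) adj' size vis'
              = pvAgo dest (pvArec graph dest (m' + 1)) adj' size vis' := by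
          intro adj'
          induction adj' with
          | nil => intro size vis' _; rfl
          | cons i rest ihr =>
            intro size vis' hvis'
            by_cases hid : i = dest
            · simp only [pvAgo, if_pos hid]
            · have hmu' : pvMu graph vis' ≤ pvMu graph (PySem.Set.add vis src) :=
                pvMu_mono graph hvis'
              have heq : pvArec graph dest (n' + 1) i vis'
                  = pvArec graph dest (m' + 1) i vis' :=
                ih (pvMu graph vis') (by omega) n' m' i vis' rfl (by omega) (by omega)
              simp only [pvAgo, if_neg hid]
              rw [heq]
              exact ihr _ _ (pvSub_trans hvis' (pvArec_grow graph dest (m' + 1) i vis'))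
        exact hcong _ 1 _ (pvSub_refl _)

-- A's value at full fuel, processing a list of roots sequentially (the reference semantics
-- both ports are reduced to)
def pvSeq (graph : List (Int × List Int)) (dest : Int) :
    List Int → PySem.Set Int → Int × PySem.Set Int
  | [], vis => (0, vis)
  | u :: rest, vis =>
    let p := pvArec graph dest (graph.length + 1) u vis
    let q := pvSeq graph dest rest p.2
    (p.1 + q.1, q.2)

theorem pvSeq_append (graph : List (Int × List Int)) (dest : Int) :
    ∀ (xs ys : List Int) (vis : PySem.Set Int),
      pvSeq graph dest (xs ++ ys) vis
        = ((pvSeq graph dest xs vis).1 + (pvSeq graph dest ys (pvSeq graph dest xs vis).2).1,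
           (pvSeq graph dest ys (pvSeq graph dest xs vis).2).2) := by
  intro xs
  induction xs with
  | nil => intro ys vis; simp [pvSeq]
  | cons u rest ih =>
    intro ys vis
    simp only [List.cons_append, pvSeq, ih]
    exact Prod.ext (by ring) rfl

-- A's loop over a neighbour list equals the sequential semantics of the pre-dest prefix
theorem pvAgo_eq_seq (graph : List (Int × List Int)) (dest : Int) (n : Nat) (vis1 : PySem.Set Int)
    (hbound : ∀ vis' : PySem.Set Int, pvSub vis1 vis' → pvMu graph vis' + 1 ≤ n + 1) :
    ∀ (adj : List Int) (size : Int) (vis' : PySem.Set Int), pvSub vis1 vis' →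
      pvAgo dest (pvArec graph dest (n + 1)) adj size vis'
        = (size + (pvSeq graph dest (pvPrefix dest adj) vis').1,
           (pvSeq graph dest (pvPrefix dest adj) vis').2) := by
  intro adj
  induction adj with
  | nil => intro size vis' _; simp [pvAgo, pvPrefix, pvSeq]
  | cons i rest ih =>
    intro size vis' hvis'
    by_cases hid : i = dest
    · simp only [pvAgo, pvPrefix, if_pos hid, pvSeq]
      exact Prod.ext (by dsimp; ring) rfl
    · have hmu : pvMu graph vis' + 1 ≤ n + 1 := hbound vis' hvis'
      have hfull : pvArec graph dest (n + 1) i vis'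
          = pvArec graph dest (graph.length + 1) i vis' :=
        pvArec_mono graph dest (pvMu graph vis') n graph.length i vis' rfl (by omega)
          (pvMu_le_length graph vis')
      simp only [pvAgo, pvPrefix, if_neg hid]
      rw [hfull]
      rw [ih _ _ (pvSub_trans hvis'
        (hfull ▸ pvArec_grow graph dest (n + 1) i vis'))]
      simp only [pvSeq]
      exact Prod.ext (by dsimp; ring) rfl

-- unfolding A's recursion at full fuel on an unvisited node
theorem pvArec_unfold_full (graph : List (Int × List Int)) (dest : Int) (u : Int)
    (vis : PySem.Set Int) (hu : u ∉ vis) :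
    pvArec graph dest (graph.length + 1) u vis
      = (1 + (pvSeq graph dest (pvPrefix dest (PySem.Dict.getD (PySem.Dict.mk graph) u []))
                (PySem.Set.add vis u)).1,
         (pvSeq graph dest (pvPrefix dest (PySem.Dict.getD (PySem.Dict.mk graph) u []))
                (PySem.Set.add vis u)).2) := by
  simp only [pvArec, if_neg (pv_contains_false hu)]
  rcases hadj : (PySem.Dict.mk graph).get? u with _ | adj
  · rw [pv_getD_none hadj]; simp [pvAgo, pvPrefix, pvSeq]
  · have hkey : ∃ p ∈ graph, p.1 = u := pv_get?_mk_some hadj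
    have hdec : pvMu graph (PySem.Set.add vis u) + 1 ≤ pvMu graph vis :=
      pvMu_add_key vis hkey hu
    have hlen : pvMu graph vis ≤ graph.length := pvMu_le_length graph vis
    obtain ⟨n', hn'⟩ : ∃ n', graph.length = n' + 1 := ⟨graph.length - 1, by omega⟩
    rw [hn']
    exact pvAgo_eq_seq graph dest n' (PySem.Set.add vis u)
      (fun vis' hsub => by have := pvMu_mono graph hsub; omega)
      _ 1 _ (pvSub_refl _)

-- the cost left for B's loop: Σ (len(adj)+1) over the not-yet-visited keys
def pvCost (graph : List (Int × List Int)) (vis : PySem.Set Int) : Nat :=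
  ((graph.filter (fun p => !(PySem.Set.contains vis p.1))).map (fun p => p.2.length + 1)).sum

theorem pvCost_sub (graph : List (Int × List Int)) {v w : PySem.Set Int} (h : pvSub v w) :
    pvCost graph w ≤ pvCost graph v := by
  induction graph with
  | nil => simp [pvCost]
  | cons q t ih =>
    by_cases hw : q.1 ∈ w
    · by_cases hv : q.1 ∈ v <;> simp [pvCost, hw, hv] at ih ⊢ <;> omega
    · have hv : q.1 ∉ v := fun hv => hw (h q.1 hv)
      simp [pvCost, hw, hv] at ih ⊢; omega

theorem pvCost_skip (graph : List (Int × List Int)) (vis : PySem.Set Int) (u : Int)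
    (h : ∀ p ∈ graph, p.1 ≠ u) : pvCost graph (PySem.Set.add vis u) = pvCost graph vis := by
  induction graph with
  | nil => rfl
  | cons q t ih =>
    have hq : q.1 ≠ u := h q (by simp)
    have ih' := ih (fun p hp => h p (by simp [hp]))
    by_cases hc : q.1 ∈ vis <;> simp [pvCost, hq, hc] at ih' ⊢ <;> omega

theorem pvCost_key {graph : List (Int × List Int)} {u : Int} {adj : List Int}
    (vis : PySem.Set Int) (h : (PySem.Dict.mk graph).get? u = some adj) (hu : u ∉ vis) :
    pvCost graph (PySem.Set.add vis u) + adj.length + 1 ≤ pvCost graph vis := by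
  induction graph with
  | nil => simp [PySem.Dict.get?] at h
  | cons q t ih =>
    rw [PySem.Dict.get?_mk_cons] at h
    by_cases hq : q.1 = u
    · have hadj : q.2 = adj := by simpa [hq] using h
      have hct := pvCost_sub t (pvSub_add vis u)
      simp [pvCost, hq, hu, hadj] at hct ⊢
      omega
    · have ih' := ih (by simpa [hq] using h)
      by_cases hc : q.1 ∈ vis <;> simp [pvCost, hq, hc] at ih' ⊢ <;> omega

theorem pvPrefix_length_le (dest : Int) : ∀ l : List Int, (pvPrefix dest l).length ≤ l.length := by
  intro l
  induction l with
  | nil => simp [pvPrefix]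
  | cons i rest ih => by_cases hid : i = dest <;> simp [pvPrefix, hid] <;> omega

theorem pvCost_le_total (graph : List (Int × List Int)) (vis : PySem.Set Int) :
    pvCost graph vis ≤ (graph.map (fun p => p.2.length + 1)).sum := by
  induction graph with
  | nil => simp [pvCost]
  | cons q t ih =>
    by_cases hc : q.1 ∈ vis <;> simp [pvCost, hc] at ih ⊢ <;> omega

-- B's stack loop computes the sequential semantics of its stack
theorem pvBloop_eq_seq (graph : List (Int × List Int)) (dest : Int) :
    ∀ (n : Nat) (stack : List Int) (count : Int) (vis : PySem.Set Int),
      stack.length + pvCost graph vis ≤ n →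
      pvBloop graph dest n stack count vis = count + (pvSeq graph dest stack vis).1 := by
  intro n
  induction n with
  | zero =>
    intro stack count vis hb
    have hst : stack = [] := by
      cases stack with
      | nil => rfl
      | cons u rest => simp at hb
    subst hst; simp [pvBloop, pvSeq]
  | succ n ih =>
    intro stack count vis hb
    cases stack with
    | nil => simp [pvBloop, pvSeq]
    | cons u rest =>
      by_cases hu : u ∈ vis
      · have harec : pvArec graph dest (graph.length + 1) u vis = (0, vis) := by
          simp only [pvArec, if_pos (pv_contains_true hu)]
        simp only [pvBloop, if_pos (pv_contains_true hu), pvSeq, harec]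
        rw [ih rest count vis (by simp at hb ⊢; omega)]
        simp
      · simp only [pvBloop, if_neg (pv_contains_false hu)]
        have hbound : (pvPrefix dest (PySem.Dict.getD (PySem.Dict.mk graph) u []) ++ rest).length
            + pvCost graph (PySem.Set.add vis u) ≤ n := by
          rcases hadj : (PySem.Dict.mk graph).get? u with _ | adj
          · have hcs := pvCost_skip graph vis u (pv_get?_mk_none hadj)
            rw [pv_getD_none hadj]
            simp [pvPrefix] at hb ⊢
            omega
          · have hgd := pv_getD_first hadj
            have hck := pvCost_key vis hadj hu
            have hpl := pvPrefix_length_le dest adj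
            rw [hgd]
            simp at hb ⊢
            omega
        rw [ih _ (count + 1) _ hbound]
        rw [pvSeq_append]
        simp only [pvSeq, pvArec_unfold_full graph dest u vis hu]
        ring

-- ===== VERDICT (by name: the statement is the Claim_ definition above) =====
theorem search_dest_1_spec : Claim_equal_search_dest_1 := by
  intro graph src dest visited _ _
  unfold Spec_search_dest_1 search_dest_1 search_dest_1_alt
  rw [pvBloop_eq_seq graph dest _ [src] 0 (PySem.Set.ofList visited)
    (by have hct := pvCost_le_total graph (PySem.Set.ofList visited)
        simp [pvCost] at hct ⊢; omega)]
  simp [pvSeq]
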